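-- pv_equiv track=rewrite | github.com/Rih/backend-test | backend/ejercicio_3/palindrome.py | rebuild_words
-- ===== SOURCE A (Python) =====
-- def rebuild_words(x1, y1, full_word, init_word, palindromes, dp):
--     n = len(full_word)
--     pal = init_word
--     while x1 > 0 and y1 < n and dp[x1][y1] == 1:
--         pal = full_word[x1] + pal + full_word[x1]
--         if len(pal) > 2:  # 1 and 2 word palindromes already added
--             palindromes.append(pal)
--         x1 = x1 - 1
--         y1 = y1 + 1
--     return palindromes
-- ===== SOURCE B (Python) =====
-- def rebuild_words(x1, y1, full_word, init_word, palindromes, dp):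
--     n = len(full_word)
--     # phase 1: walk the dp diagonal only to find how many expansion steps are valid
--     k = 0
--     while x1 - k > 0 and y1 + k < n and dp[x1 - k][y1 + k] == 1:
--         k += 1
--     # phase 2: build each palindrome directly from a slice of full_word
--     for t in range(1, k + 1):
--         arm = full_word[x1 - t + 1:x1 + 1]
--         pal = arm + init_word + arm[::-1]
--         if len(pal) > 2:
--             palindromes.append(pal)
--     return palindromes
-- ===== Notes on version B (the rewrite author's own statement) =====
-- stated objective: alternative
-- what changed: B separates the dp-diagonal walk (which only counts the valid expansion steps) from string construction, then builds each palindrome in one shot from a slice of full_word and its reverse, instead of A's interleaved character-by-character double concatenation; both append to `palindromes` in place.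
import Mathlib
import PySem

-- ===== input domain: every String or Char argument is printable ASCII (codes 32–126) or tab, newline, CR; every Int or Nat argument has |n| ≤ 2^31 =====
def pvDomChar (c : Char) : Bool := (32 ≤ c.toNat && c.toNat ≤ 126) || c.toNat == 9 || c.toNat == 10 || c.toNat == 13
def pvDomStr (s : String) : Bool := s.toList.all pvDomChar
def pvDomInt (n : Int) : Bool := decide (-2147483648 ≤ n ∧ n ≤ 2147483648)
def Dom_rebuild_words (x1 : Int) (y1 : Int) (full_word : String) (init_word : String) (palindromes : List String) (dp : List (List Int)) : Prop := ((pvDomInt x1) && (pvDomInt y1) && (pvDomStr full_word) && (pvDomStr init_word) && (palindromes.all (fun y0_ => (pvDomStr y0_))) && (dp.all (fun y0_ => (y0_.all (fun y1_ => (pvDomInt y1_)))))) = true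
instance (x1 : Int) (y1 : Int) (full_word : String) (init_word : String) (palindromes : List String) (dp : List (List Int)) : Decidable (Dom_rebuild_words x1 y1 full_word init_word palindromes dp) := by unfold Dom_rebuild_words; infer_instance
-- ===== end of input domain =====

-- B splits A's interleaved diagonal walk into a counting pass over dp followed by
-- slice-based construction of each palindrome; both append to `palindromes` in place
-- (the equivalence proved is about the returned list, which is that same list).


-- ===== PORT A =====
-- A's while loop; fuel = x1.toNat bounds the iteration count exactly (each step needs
-- x > 0 and decrements x, so the loop runs at most x1 times and fuel never cuts it short).
-- On an index error of Python (dp row / fw char out of range) the port returns the list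
-- built so far; those inputs are excluded by Pre_.
def goA (dp : List (List Int)) (fw : List Char) : Nat → Int → Int → List Char → List String → List String
  | 0, _, _, _, acc => acc
  | Nat.succ fuel, x, y, pal, acc =>
    if 0 < x ∧ y < (fw.length : Int) ∧
        ((PySem.List.pyGet? dp x).bind (fun row => PySem.List.pyGet? row y)) = some 1 then
      match PySem.List.pyGet? fw x with
      | none => acc
      | some c =>
        let pal' := c :: pal ++ [c]
        let acc' := if 2 < pal'.length then acc ++ [String.ofList pal'] else acc
        goA dp fw fuel (x - 1) (y + 1) pal' acc'
    else acc

def rebuild_words (x1 : Int) (y1 : Int) (full_word : String) (init_word : String) (palindromes : List String) (dp : List (List Int)) : List String :=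
  goA dp full_word.toList x1.toNat x1 y1 init_word.toList palindromes

-- ===== PORT B =====
-- phase 1 of Source B: count the valid expansion steps along the dp diagonal (same fuel argument)
def countB (dp : List (List Int)) (n : Int) : Nat → Int → Int → Nat
  | 0, _, _ => 0
  | Nat.succ fuel, x, y =>
    if 0 < x ∧ y < n ∧
        ((PySem.List.pyGet? dp x).bind (fun row => PySem.List.pyGet? row y)) = some 1 then
      countB dp n fuel (x - 1) (y + 1) + 1
    else 0

def rebuild_words_alt (x1 : Int) (y1 : Int) (full_word : String) (init_word : String) (palindromes : List String) (dp : List (List Int)) : List String :=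
  let s := full_word.toList
  let n : Int := s.length
  let k := countB dp n x1.toNat x1 y1
  -- phase 2 of Source B: for t in range(1, k+1): arm = full_word[x1-t+1:x1+1]; pal = arm + init + arm[::-1]
  (PySem.List.pyRange 1 ((k : Int) + 1) 1).foldl
    (fun acc t =>
      let arm := PySem.List.slice s (some (x1 - t + 1)) (some (x1 + 1))
      let pal := arm ++ init_word.toList ++ arm.reverse
      if 2 < pal.length then acc ++ [String.ofList pal] else acc)
    palindromes

-- ===== PRECONDITION & SPEC =====
-- Pre_ holds exactly when Python A returns without an IndexError: if the loop runs at all,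
-- the first dp row index x1 is in range, and at every diagonal step the loop actually reaches
-- (all earlier dp entries equal 1) the dp access is in range and, if the step is taken, the
-- full_word index is in range.
def Pre_rebuild_words (x1 : Int) (y1 : Int) (full_word : String) (init_word : String) (palindromes : List String) (dp : List (List Int)) : Prop :=
  (0 < x1 ∧ y1 < (full_word.toList.length : Int)) →
    (x1 < (dp.length : Int) ∧
      ∀ t : Nat, t < x1.toNat → y1 + t < (full_word.toList.length : Int) →
        (∀ u : Nat, u < t →
          ((PySem.List.pyGet? dp (x1 - u)).bind (fun row => PySem.List.pyGet? row (y1 + u))) = some 1) →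
        (((PySem.List.pyGet? dp (x1 - t)).bind (fun row => PySem.List.pyGet? row (y1 + t))).isSome ∧
         (((PySem.List.pyGet? dp (x1 - t)).bind (fun row => PySem.List.pyGet? row (y1 + t))) = some 1 →
           x1 - t < (full_word.toList.length : Int))))
instance (x1 : Int) (y1 : Int) (full_word : String) (init_word : String) (palindromes : List String) (dp : List (List Int)) : Decidable (Pre_rebuild_words x1 y1 full_word init_word palindromes dp) := by unfold Pre_rebuild_words; infer_instance

def pvWitness_rebuild_words : Int × Int × String × String × List String × List (List Int) :=
  (1, 2, "aba", "b", [], [[0,0,0],[0,0,1],[0,0,0]])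

def Spec_rebuild_words (x1 : Int) (y1 : Int) (full_word : String) (init_word : String) (palindromes : List String) (dp : List (List Int)) (out : List String) : Prop := out = rebuild_words_alt x1 y1 full_word init_word palindromes dp
instance (x1 : Int) (y1 : Int) (full_word : String) (init_word : String) (palindromes : List String) (dp : List (List Int)) (out : List String) : Decidable (Spec_rebuild_words x1 y1 full_word init_word palindromes dp out) := by unfold Spec_rebuild_words; infer_instance

-- ===== CLAIM (what is proved, stated in full; the proofs are below) =====
def Claim_equal_rebuild_words : Prop := ∀ (x1 : Int) (y1 : Int) (full_word : String) (init_word : String) (palindromes : List String) (dp : List (List Int)), Dom_rebuild_words x1 y1 full_word init_word palindromes dp → Pre_rebuild_words x1 y1 full_word init_word palindromes dp → Spec_rebuild_words x1 y1 full_word init_word palindromes dp (rebuild_words x1 y1 full_word init_word palindromes dp)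

-- ===== LEMMAS AND PROOFS =====


-- a Python slice s[a:b] with both ends equal is empty
theorem pvSlice_self (s : List Char) (a : Int) : PySem.List.slice s (some a) (some a) = [] := by
  have h := PySem.List.length_slice s a a
  exact List.eq_nil_of_length_eq_zero (by omega)

-- peeling the first character off a slice
theorem pvSlice_cons (s : List Char) (a b : Int) (ha0 : 0 ≤ a) (ha : a < (s.length : Int))
    (hab : a < b) :
    PySem.List.slice s (some a) (some b) = s[a.toNat]'(by omega) :: PySem.List.slice s (some (a + 1)) (some b) := by
  rw [PySem.List.slice_toNat s ha0 (by omega), PySem.List.slice_toNat s (by omega) (by omega)]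
  rw [List.drop_eq_getElem_cons (by omega)]
  have h1 : (a + 1).toNat = a.toNat + 1 := by omega
  have h2 : b.toNat - a.toNat = (b.toNat - (a.toNat + 1)) + 1 := by omega
  rw [h1, h2, List.take_succ_cons]

-- every step counted by countB satisfies the loop condition
theorem pvCount_mem (dp : List (List Int)) (n : Int) :
    ∀ (fuel : Nat) (x y : Int) (u : Nat), u < countB dp n fuel x y →
      0 < x - u ∧ y + u < n ∧
      ((PySem.List.pyGet? dp (x - u)).bind (fun row => PySem.List.pyGet? row (y + u))) = some 1 := by
  intro fuel
  induction fuel with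
  | zero => intro x y u hu; simp [countB] at hu
  | succ f ih =>
    intro x y u hu
    by_cases hc : 0 < x ∧ y < n ∧ ((PySem.List.pyGet? dp x).bind (fun row => PySem.List.pyGet? row y)) = some 1
    · rw [countB, if_pos hc] at hu
      cases u with
      | zero => simpa using hc
      | succ u =>
        have h := ih (x - 1) (y + 1) u (by omega)
        have e1 : x - 1 - u = x - (u + 1 : Nat) := by push_cast; ring
        have e2 : y + 1 + u = y + (u + 1 : Nat) := by push_cast; ring
        rw [e1, e2] at h
        exact h
    · rw [countB, if_neg hc] at hu; omega

-- the core invariant: A's walk from step t0, with pal equal to arm ++ init ++ arm.reverse,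
-- produces exactly B's slice-built palindromes for steps t0+1 .. t0+k
theorem pvMain (dp : List (List Int)) (s : List Char) (iw : List Char) (x1 y1 : Int) :
    ∀ (k t0 : Nat) (acc : List String),
      countB dp (s.length : Int) (x1 - t0).toNat (x1 - t0) (y1 + t0) = k →
      (∀ u : Nat, u < k → x1 - (t0 + u : Nat) < (s.length : Int)) →
      goA dp s (x1 - t0).toNat (x1 - t0) (y1 + t0)
        (PySem.List.slice s (some (x1 - t0 + 1)) (some (x1 + 1)) ++ iw ++
          (PySem.List.slice s (some (x1 - t0 + 1)) (some (x1 + 1))).reverse) acc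
      = (PySem.List.pyRange ((t0 : Int) + 1) ((t0 : Int) + k + 1) 1).foldl
          (fun acc t =>
            let arm := PySem.List.slice s (some (x1 - t + 1)) (some (x1 + 1))
            let pal := arm ++ iw ++ arm.reverse
            if 2 < pal.length then acc ++ [String.ofList pal] else acc) acc := by
  intro k
  induction k with
  | zero =>
    intro t0 acc hcount _
    simp only [Nat.cast_zero, add_zero]
    have hrange : PySem.List.pyRange ((t0 : Int) + 1) ((t0 : Int) + 1) 1 = [] := by
      simp [PySem.List.pyRange]
    rw [hrange]
    cases hf : (x1 - t0).toNat with
    | zero => simp [goA]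
    | succ f =>
      rw [hf] at hcount
      by_cases hc : 0 < x1 - t0 ∧ y1 + t0 < (s.length : Int) ∧
          ((PySem.List.pyGet? dp (x1 - t0)).bind (fun row => PySem.List.pyGet? row (y1 + t0))) = some 1
      · rw [countB, if_pos hc] at hcount; omega
      · rw [goA, if_neg hc]; simp
  | succ k ih =>
    intro t0 acc hcount hvalid
    cases hf : (x1 - t0).toNat with
    | zero => rw [hf, countB] at hcount; omega
    | succ f =>
      rw [hf] at hcount
      by_cases hc : 0 < x1 - t0 ∧ y1 + t0 < (s.length : Int) ∧
          ((PySem.List.pyGet? dp (x1 - t0)).bind (fun row => PySem.List.pyGet? row (y1 + t0))) = some 1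
      case neg => rw [countB, if_neg hc] at hcount; omega
      rw [countB, if_pos hc] at hcount
      replace hcount : countB dp (s.length : Int) f (x1 - t0 - 1) (y1 + t0 + 1) = k := by omega
      have hx0 : 0 < x1 - t0 := hc.1
      have hxn : x1 - t0 < (s.length : Int) := by
        have := hvalid 0 (by omega); simpa using this
      have hget : PySem.List.pyGet? s (x1 - (t0:Int)) = some (s[(x1 - (t0:Int)).toNat]'(by omega)) := by
        exact PySem.List.pyGet?_eq_some_getElem s (by omega) (by omega)
      -- the arm grows by one character on the left
      have harm : PySem.List.slice s (some (x1 - t0)) (some (x1 + 1))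
          = s[(x1 - (t0:Int)).toNat]'(by omega) :: PySem.List.slice s (some (x1 - t0 + 1)) (some (x1 + 1)) :=
        pvSlice_cons s (x1 - t0) (x1 + 1) (by omega) hxn (by omega)
      rw [goA, if_pos hc, hget]
      set c := s[(x1 - (t0:Int)).toNat]'(by omega) with hcdef
      set arm0 := PySem.List.slice s (some (x1 - t0 + 1)) (some (x1 + 1)) with harm0
      -- the new pal is the palindrome built from the longer arm
      have hpal : c :: (arm0 ++ iw ++ arm0.reverse) ++ [c]
          = (c :: arm0) ++ iw ++ (c :: arm0).reverse := by
        simp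
      have hrange : PySem.List.pyRange ((t0 : Int) + 1) ((t0 : Int) + (k + 1 : Nat) + 1) 1
          = ((t0 : Int) + 1) :: PySem.List.pyRange ((t0 : Int) + 1 + 1) ((t0 : Int) + (k + 1 : Nat) + 1) 1 := by
        apply PySem.List.pyRange_one_cons; push_cast; omega
      rw [hrange]
      simp only [List.foldl_cons]
      -- rewrite both sides to speak about the longer arm c :: arm0
      have ebound : x1 - ((t0:Int) + 1) + 1 = x1 - (t0:Int) := by ring
      rw [ebound, harm, hpal]
      -- the recursive call is the induction hypothesis at t0 + 1
      have e1 : x1 - (t0:Int) - 1 = x1 - ((t0 + 1 : Nat) : Int) := by push_cast; ring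
      have e2 : y1 + (t0:Int) + 1 = y1 + ((t0 + 1 : Nat) : Int) := by push_cast; ring
      have ef : f = (x1 - ((t0 + 1 : Nat) : Int)).toNat := by push_cast; omega
      have er1 : (t0:Int) + 1 + 1 = ((t0 + 1 : Nat) : Int) + 1 := by push_cast; ring
      have er2 : (t0:Int) + ((k + 1 : Nat) : Int) + 1 = ((t0 + 1 : Nat) : Int) + (k : Int) + 1 := by
        push_cast; ring
      have earm : PySem.List.slice s (some (x1 - ((t0 + 1 : Nat) : Int) + 1)) (some (x1 + 1)) = c :: arm0 := by
        have h : x1 - ((t0 + 1 : Nat) : Int) + 1 = x1 - (t0:Int) := by push_cast; ring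
        rw [h, harm]
      have hcount' : countB dp (s.length : Int) (x1 - ((t0 + 1 : Nat) : Int)).toNat
          (x1 - ((t0 + 1 : Nat) : Int)) (y1 + ((t0 + 1 : Nat) : Int)) = k := by
        rw [← ef, ← e1, ← e2]; exact hcount
      have hvalid' : ∀ u : Nat, u < k → x1 - ((t0 + 1 : Nat) + u : Nat) < (s.length : Int) := by
        intro u hu
        have h := hvalid (u + 1) (by omega)
        have e : (((t0 + 1 : Nat) + u : Nat) : Int) = ((t0 + (u + 1) : Nat) : Int) := by push_cast; ring
        rw [e]; exact h
      rw [e1, e2, show f = (x1 - ((t0 + 1 : Nat) : Int)).toNat from ef, er1, er2]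
      have ih' := ih (t0 + 1)
        (if 2 < ((c :: arm0) ++ iw ++ (c :: arm0).reverse).length then
            acc ++ [String.ofList ((c :: arm0) ++ iw ++ (c :: arm0).reverse)] else acc)
        hcount' hvalid'
      rw [earm] at ih'
      exact ih'

theorem rebuild_words_spec : Claim_equal_rebuild_words := by
  intro x1 y1 full_word init_word palindromes dp _ hpre
  unfold Spec_rebuild_words rebuild_words rebuild_words_alt
  have hvalid : ∀ u : Nat, u < countB dp (full_word.toList.length : Int) x1.toNat x1 y1 →
      x1 - ((0 + u : Nat) : Int) < (full_word.toList.length : Int) := by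
    intro u hu
    obtain ⟨h1, h2, h3⟩ := pvCount_mem dp (full_word.toList.length : Int) x1.toNat x1 y1 u hu
    obtain ⟨hx0, hy0, _⟩ := pvCount_mem dp (full_word.toList.length : Int) x1.toNat x1 y1 0 (by omega)
    have hall := (hpre ⟨by simpa using hx0, by simpa using hy0⟩).2
    have hprev : ∀ v : Nat, v < u →
        ((PySem.List.pyGet? dp (x1 - v)).bind (fun row => PySem.List.pyGet? row (y1 + v))) = some 1 :=
      fun v hv => (pvCount_mem dp (full_word.toList.length : Int) x1.toNat x1 y1 v (by omega)).2.2
    have h := (hall u (by omega) h2 hprev).2 h3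
    simpa using h
  have hcount0 : countB dp (full_word.toList.length : Int) (x1 - ((0:Nat) : Int)).toNat
      (x1 - ((0:Nat) : Int)) (y1 + ((0:Nat) : Int))
      = countB dp (full_word.toList.length : Int) x1.toNat x1 y1 := by
    norm_num
  have hm := pvMain dp full_word.toList init_word.toList x1 y1
    (countB dp (full_word.toList.length : Int) x1.toNat x1 y1) 0 palindromes hcount0 hvalid
  have hs0 : PySem.List.slice full_word.toList (some (x1 - ((0:Nat) : Int) + 1)) (some (x1 + 1)) = [] := by
    norm_num [pvSlice_self]
  rw [hs0] at hm
  simp only [Nat.cast_zero, sub_zero, add_zero, List.reverse_nil, List.nil_append, List.append_nil,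
    zero_add] at hm
  exact hm
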